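-- pv_equiv track=rewrite | github.com/serhatandic/advent-of-code-2023 | day5/p2.py | divide_range_into_pieces
-- ===== SOURCE A (Python) =====
-- def divide_range_into_pieces(fst, snd, pieces=8):
--     total_range = snd - fst
--     piece_size, remainder = divmod(total_range, pieces)
--
--     ranges = []
--     start = fst
--
--     for i in range(pieces):
--         end = start + piece_size + (1 if i < remainder else 0)
--         ranges.append((start, end))
--         start = end
--
--     return ranges
-- ===== SOURCE B (Python) =====
-- def divide_range_into_pieces(fst, snd, pieces=8):
--     piece_size, remainder = divmod(snd - fst, pieces)
--
--     def boundary(i):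
--         return fst + i * piece_size + min(i, remainder)
--
--     return [(boundary(i), boundary(i + 1)) for i in range(pieces)]
-- ===== Notes on version B (the rewrite author's own statement) =====
-- stated objective: alternative
-- what changed: Replaces the sequential accumulator loop (each start depends on the previous end) by a closed-form boundary function b(i)=fst+i*piece_size+min(i,remainder), building every piece independently from its index.
import Mathlib
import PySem

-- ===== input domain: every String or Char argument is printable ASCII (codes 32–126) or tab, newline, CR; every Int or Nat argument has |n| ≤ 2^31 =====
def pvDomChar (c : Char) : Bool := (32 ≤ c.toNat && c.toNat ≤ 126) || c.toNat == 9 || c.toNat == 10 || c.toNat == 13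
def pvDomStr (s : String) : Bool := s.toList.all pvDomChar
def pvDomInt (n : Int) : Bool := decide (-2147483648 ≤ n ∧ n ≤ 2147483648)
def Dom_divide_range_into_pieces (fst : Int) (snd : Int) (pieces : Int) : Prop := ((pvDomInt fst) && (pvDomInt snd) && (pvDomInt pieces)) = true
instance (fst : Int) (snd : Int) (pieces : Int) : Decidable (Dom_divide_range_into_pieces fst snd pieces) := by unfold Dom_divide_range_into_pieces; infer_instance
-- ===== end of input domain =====

-- B replaces A's running-accumulator loop by a closed-form boundary function
-- b(i) = fst + i*piece_size + min(i, remainder); each piece is derived from its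
-- index alone (objective: alternative decomposition, same cost).


-- ===== PORT A =====
def divide_range_into_pieces (fst : Int) (snd : Int) (pieces : Int) : List (Int × Int) :=
  let total_range := snd - fst
  let piece_size := PySem.Int.floordiv total_range pieces
  let remainder := PySem.Int.mod total_range pieces
  let st :=
    (PySem.List.pyRange 0 pieces 1).foldl
      (fun (st : List (Int × Int) × Int) i =>
        let e := st.2 + piece_size + (if i < remainder then 1 else 0)
        (st.1 ++ [(st.2, e)], e))
      ([], fst)
  st.1

-- ===== PORT B =====
def divide_range_into_pieces_alt (fst : Int) (snd : Int) (pieces : Int) : List (Int × Int) :=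
  let piece_size := PySem.Int.floordiv (snd - fst) pieces
  let remainder := PySem.Int.mod (snd - fst) pieces
  let boundary := fun (i : Int) => fst + i * piece_size + min i remainder
  (PySem.List.pyRange 0 pieces 1).map (fun i => (boundary i, boundary (i + 1)))

-- ===== PRECONDITION & SPEC =====
-- Pre_ excludes only pieces = 0, where Python's divmod raises ZeroDivisionError.
def Pre_divide_range_into_pieces (fst : Int) (snd : Int) (pieces : Int) : Prop := pieces ≠ 0
instance (fst : Int) (snd : Int) (pieces : Int) : Decidable (Pre_divide_range_into_pieces fst snd pieces) := by unfold Pre_divide_range_into_pieces; infer_instance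
def pvWitness_divide_range_into_pieces : Int × Int × Int := (3, 20, 5)
def Spec_divide_range_into_pieces (fst : Int) (snd : Int) (pieces : Int) (out : List (Int × Int)) : Prop := out = divide_range_into_pieces_alt fst snd pieces
instance (fst : Int) (snd : Int) (pieces : Int) (out : List (Int × Int)) : Decidable (Spec_divide_range_into_pieces fst snd pieces out) := by unfold Spec_divide_range_into_pieces; infer_instance

-- ===== CLAIM (what is proved, stated in full; the proofs are below) =====
def Claim_equal_divide_range_into_pieces : Prop := ∀ (fst : Int) (snd : Int) (pieces : Int), Dom_divide_range_into_pieces fst snd pieces → Pre_divide_range_into_pieces fst snd pieces → Spec_divide_range_into_pieces fst snd pieces (divide_range_into_pieces fst snd pieces)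

-- ===== LEMMAS AND PROOFS =====

-- Loop invariant: starting the accumulator loop at boundary(a) appends exactly
-- the closed-form pieces for indices a, a+1, …, a+n-1 and ends at boundary(a+n).
theorem pv_fold_inv (fst q r : Int) :
    ∀ (n : Nat) (a : Int) (acc : List (Int × Int)),
      (PySem.List.pyRange a (a + n) 1).foldl
        (fun (st : List (Int × Int) × Int) i =>
          let e := st.2 + q + (if i < r then 1 else 0)
          (st.1 ++ [(st.2, e)], e))
        (acc, fst + a * q + min a r)
      = (acc ++ (PySem.List.pyRange a (a + n) 1).map
            (fun i => (fst + i * q + min i r, fst + (i + 1) * q + min (i + 1) r)),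
         fst + (a + n) * q + min (a + n) r) := by
  intro n
  induction n with
  | zero =>
      intro a acc
      rw [show a + ((0 : Nat) : Int) = a by simp,
          PySem.List.pyRange_one_eq_nil (le_refl a)]
      simp
  | succ m ih =>
      intro a acc
      have hlt : a < a + ((m + 1 : Nat) : Int) := by push_cast; omega
      rw [PySem.List.pyRange_one_cons hlt]
      simp only [List.foldl_cons, List.map_cons]
      have hmin : min a r + (if a < r then 1 else 0) = min (a + 1) r := by
        split_ifs <;> omega
      have he : fst + a * q + min a r + q + (if a < r then 1 else 0)
          = fst + (a + 1) * q + min (a + 1) r := by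
        rw [← hmin]; ring
      rw [he]
      have hrw : a + ((m + 1 : Nat) : Int) = (a + 1) + (m : Int) := by push_cast; ring
      rw [hrw]
      have := ih (a + 1) (acc ++ [(fst + a * q + min a r, fst + (a + 1) * q + min (a + 1) r)])
      rw [this]
      simp [List.append_assoc]

-- ===== VERDICT (by name: the statement is the Claim_ definition above) =====
theorem divide_range_into_pieces_spec : Claim_equal_divide_range_into_pieces := by
  intro fst snd pieces _ hp
  unfold Spec_divide_range_into_pieces divide_range_into_pieces divide_range_into_pieces_alt
  simp only []
  set q := PySem.Int.floordiv (snd - fst) pieces with hq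
  set r := PySem.Int.mod (snd - fst) pieces with hr
  by_cases hpos : 0 < pieces
  · have hr0 : 0 ≤ r := by
      rw [hr, PySem.Int.mod_eq_emod_of_pos hpos]
      exact Int.emod_nonneg _ (by omega)
    have key := pv_fold_inv fst q r pieces.toNat 0 []
    rw [show ((0 : Int) + (pieces.toNat : Int)) = pieces by omega] at key
    rw [show fst + 0 * q + min 0 r = fst by rw [min_eq_left hr0]; ring] at key
    rw [key]
    simp
  · have hnil : PySem.List.pyRange 0 pieces 1 = [] :=
      PySem.List.pyRange_one_eq_nil (by omega)
    simp [hnil]
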